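-- pv_equiv track=rewrite | github.com/jpfigueredo/ciencia-da-computacao | 5-Projeto_de_Bloco_Ciência_da_Computação[24E4_5]/projects/tp3-files/Exercicio-2.2.py | multiplica_linha
-- ===== SOURCE A (Python) =====
-- def multiplica_linha(args):
--     A, B, linha = args
--     num_colunas_B = len(B[0])
--     num_colunas_A = len(A[0])
--     resultado_linha = []
--     for j in range(num_colunas_B):
--         soma = sum(A[linha][k] * B[k][j] for k in range(num_colunas_A))
--         resultado_linha.append(soma)
--     return resultado_linha
-- ===== SOURCE B (Python) =====
-- def multiplica_linha(args):
--     A, B, linha = args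
--     n = len(B[0])
--     row = A[linha]
--     resultado_linha = [0] * n
--     for k in range(len(A[0])):
--         aik = row[k]
--         resultado_linha = [r + aik * b for r, b in zip(resultado_linha, B[k])]
--     return resultado_linha
-- ===== Notes on version B (the rewrite author's own statement) =====
-- stated objective: alternative
-- what changed: B computes the row as a running accumulator vector (a weighted sum of rows of B over the shared index k) instead of A's independent per-column dot products, preserving per-column addition order.
-- outside the precondition, e.g. on multiplica_linha(([[]], [[1]], 5)): A returns [0], B raises IndexError; on multiplica_linha(([[1]], [[]], 5)): A returns [], B raises IndexError
import Mathlib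
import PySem

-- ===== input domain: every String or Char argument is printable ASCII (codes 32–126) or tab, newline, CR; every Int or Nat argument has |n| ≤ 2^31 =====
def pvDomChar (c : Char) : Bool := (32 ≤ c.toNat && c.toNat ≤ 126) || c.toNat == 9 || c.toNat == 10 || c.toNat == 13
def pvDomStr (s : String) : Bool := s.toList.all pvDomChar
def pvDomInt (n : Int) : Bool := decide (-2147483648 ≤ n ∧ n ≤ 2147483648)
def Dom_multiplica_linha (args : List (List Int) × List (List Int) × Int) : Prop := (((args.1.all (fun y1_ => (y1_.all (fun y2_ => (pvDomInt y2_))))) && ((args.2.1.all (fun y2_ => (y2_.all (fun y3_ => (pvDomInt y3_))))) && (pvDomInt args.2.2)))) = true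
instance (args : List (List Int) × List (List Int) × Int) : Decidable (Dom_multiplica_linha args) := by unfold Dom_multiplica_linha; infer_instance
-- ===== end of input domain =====

-- B computes the row as a running accumulator (weighted sum of the rows of B) instead of
-- per-column dot products; same cost, alternative decomposition. Per-column addition order is preserved.

-- ===== PORT A =====
-- literal port of A: for j in range(len(B[0])): append sum(A[linha][k]*B[k][j] for k in range(len(A[0])))
def multiplica_linha (args : List (List Int) × List (List Int) × Int) : List Int :=
  let Am := args.1
  let Bm := args.2.1
  let linha := args.2.2
  let ncB : Nat := (PySem.List.pyGetD Bm 0 ([] : List Int)).length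
  let ncA : Nat := (PySem.List.pyGetD Am 0 ([] : List Int)).length
  (PySem.List.pyRange 0 (ncB : Int) 1).foldl
    (fun acc j => acc ++ [((PySem.List.pyRange 0 (ncA : Int) 1).map
      (fun k => PySem.List.pyGetD (PySem.List.pyGetD Am linha ([] : List Int)) k 0 *
                PySem.List.pyGetD (PySem.List.pyGetD Bm k ([] : List Int)) j 0)).sum]) []

-- ===== PORT B =====
-- literal port of B: res = [0]*len(B[0]); for k: res = [r + row[k]*b for r, b in zip(res, B[k])]
def multiplica_linha_alt (args : List (List Int) × List (List Int) × Int) : List Int :=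
  let Am := args.1
  let Bm := args.2.1
  let linha := args.2.2
  let n : Nat := (PySem.List.pyGetD Bm 0 ([] : List Int)).length
  let row := PySem.List.pyGetD Am linha ([] : List Int)
  (PySem.List.pyRange 0 ((PySem.List.pyGetD Am 0 ([] : List Int)).length : Int) 1).foldl
    (fun res k =>
      (res.zip (PySem.List.pyGetD Bm k ([] : List Int))).map
        (fun rb => rb.1 + PySem.List.pyGetD row k 0 * rb.2))
    (List.replicate n 0)

-- ===== PRECONDITION & SPEC =====
-- Pre_ excludes inputs where A raises (empty A or B, and — when both dimension counts are
-- positive — a row index out of range or rows too short), and the degenerate ragged inputs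
-- where A's lazy generator never performs the indexing (zero columns in A or B) while B's
-- accumulator still indexes A[linha] and B[k] and raises.
def Pre_multiplica_linha (args : List (List Int) × List (List Int) × Int) : Prop :=
  args.1 ≠ [] ∧ args.2.1 ≠ [] ∧ PySem.Raise.InRange args.1.length args.2.2 ∧
  (args.1.getD 0 []).length ≤ (PySem.List.pyGetD args.1 args.2.2 ([] : List Int)).length ∧
  (args.1.getD 0 []).length ≤ args.2.1.length ∧
  ∀ r ∈ args.2.1.take (args.1.getD 0 []).length, (args.2.1.getD 0 []).length ≤ r.length
instance (args : List (List Int) × List (List Int) × Int) : Decidable (Pre_multiplica_linha args) := by unfold Pre_multiplica_linha; infer_instance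

def pvWitness_multiplica_linha : (List (List Int) × List (List Int) × Int) :=
  ([[1, 2], [3, 4]], [[5, 6], [7, 8]], 1)

def Spec_multiplica_linha (args : List (List Int) × List (List Int) × Int) (out : List Int) : Prop := out = multiplica_linha_alt args
instance (args : List (List Int) × List (List Int) × Int) (out : List Int) : Decidable (Spec_multiplica_linha args out) := by unfold Spec_multiplica_linha; infer_instance

-- ===== CLAIM (what is proved, stated in full; the proofs are below) =====
def Claim_equal_multiplica_linha : Prop := ∀ (args : List (List Int) × List (List Int) × Int), Dom_multiplica_linha args → Pre_multiplica_linha args → Spec_multiplica_linha args (multiplica_linha args)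

-- ===== LEMMAS AND PROOFS =====

-- one accumulator step: updating a vector of length n by zipping with a row of length ≥ n
lemma pvStep (bk : List Int) (aik : Int) (n : Nat) (g : Nat → Int) (hn : n ≤ bk.length) :
    (((List.range n).map g).zip bk).map (fun rb => rb.1 + aik * rb.2)
      = (List.range n).map (fun (j : Nat) => g j + aik * PySem.List.pyGetD bk (j : Int) 0) := by
  apply List.ext_getElem
  · simp; omega
  · intro i h1 h2
    simp only [List.length_map, List.length_zip, List.length_range] at h1
    have hi : i < n := by omega
    have hib : i < bk.length := by omega
    simp [List.getElem_zip, PySem.List.pyGetD_natCast, List.getD_eq_getElem?_getD,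
      List.getElem?_eq_getElem hib]

-- loop invariant: after m steps the accumulator holds the partial sums over k < m
lemma pvLoop (Bm : List (List Int)) (row : List Int) (n : Nat) (m : Nat)
    (hB : ∀ k, k < m → n ≤ (PySem.List.pyGetD Bm (k : Int) ([] : List Int)).length) :
    (((List.range m).map (fun (k : Nat) => (k : Int))).foldl
      (fun res k =>
        (res.zip (PySem.List.pyGetD Bm k ([] : List Int))).map
          (fun rb => rb.1 + PySem.List.pyGetD row k 0 * rb.2))
      (List.replicate n 0))
    = (List.range n).map (fun (j : Nat) =>
        (((List.range m).map (fun (k : Nat) => PySem.List.pyGetD row (k : Int) 0 *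
           PySem.List.pyGetD (PySem.List.pyGetD Bm (k : Int) ([] : List Int)) (j : Int) 0))).sum) := by
  induction m with
  | zero =>
      simp
  | succ m ih =>
      rw [List.range_succ, List.map_append, List.foldl_append,
        ih (fun k hk => hB k (by omega))]
      simp only [List.map_cons, List.map_nil, List.foldl_cons, List.foldl_nil]
      rw [pvStep _ _ _ _ (hB m (by omega))]
      apply List.map_congr_left
      intro j hj
      simp [List.sum_append]

theorem multiplica_linha_spec : Claim_equal_multiplica_linha := by
  intro args _hdom hpre
  obtain ⟨Am, Bm, linha⟩ := args
  obtain ⟨hA, hB, hlin, hrow, hlenB, hrows⟩ := hpre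
  dsimp only at hA hB hlin hrow hlenB hrows
  unfold Spec_multiplica_linha multiplica_linha multiplica_linha_alt
  simp only
  have hrange : ∀ c : Nat, PySem.List.pyRange 0 (c : Int) 1
      = (List.range c).map (fun (k : Nat) => (k : Int)) := by
    intro c
    rw [PySem.List.pyRange_one]
    simp only [sub_zero, Int.toNat_natCast]
    exact List.map_congr_left (fun k _ => by omega)
  have hBk : ∀ k, k < (PySem.List.pyGetD Am 0 ([] : List Int)).length →
      (PySem.List.pyGetD Bm 0 ([] : List Int)).length
        ≤ (PySem.List.pyGetD Bm (k : Int) ([] : List Int)).length := by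
    intro k hk
    rw [PySem.List.pyGetD_zero] at hk
    have hkB : k < Bm.length := by omega
    have hmem : Bm[k] ∈ Bm.take (Am.getD 0 []).length := by
      rw [List.mem_take_iff_getElem]
      exact ⟨k, by omega, rfl⟩
    have := hrows _ hmem
    simpa [PySem.List.pyGetD_natCast, PySem.List.pyGetD_zero,
      List.getD_eq_getElem?_getD, List.getElem?_eq_getElem hkB] using this
  rw [hrange, hrange, PySem.List.foldl_append_singleton_eq_map,
    pvLoop Bm _ _ _ hBk, List.nil_append, List.map_map]
  apply List.map_congr_left
  intro j hj
  simp only [Function.comp_apply, List.map_map, Function.comp_def]
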